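-- pv_equiv track=rewrite | github.com/GodMorduk/keeper_bot | cmds/player.py | count_price
-- ===== SOURCE A (Python) =====
-- def count_price(now, need):
--     total_price = 0
--
--     for i in range(now + 1, need + 1):
--         tens = i // 10
--         numbers = i % 10
--         if numbers == 0:
--             tens -= 1
--
--         if tens < 1:
--             total_price += 1
--         else:
--             total_price += (tens + 1)
--
--     return total_price
-- ===== SOURCE B (Python) =====
-- def _T(n):
--     # sum of j//10 for j in range(0, n) with n >= 10, in closed form
--     q = n // 10
--     r = n - 10 * q
--     return 5 * q * (q - 1) + r * q
--
--
-- def count_price(now, need):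
--     if need <= now:
--         return 0
--     # price is 1 for i <= 10 (i.e. j = i-1 <= 9), else (i-1)//10 + 1
--     small = max(0, min(need, 10) - now)
--     l2 = max(now, 10)
--     big = 0
--     if l2 < need:
--         big = (need - l2) + _T(need) - _T(l2)
--     return small + big
-- ===== Notes on version B (the rewrite author's own statement) =====
-- stated objective: faster
-- what changed: Replaced the per-integer loop over range(now+1, need+1) by a closed-form summation: constant price 1 for the part up to 10 plus an arithmetic-series formula (sum of j//10) over the rest.
import Mathlib
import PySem

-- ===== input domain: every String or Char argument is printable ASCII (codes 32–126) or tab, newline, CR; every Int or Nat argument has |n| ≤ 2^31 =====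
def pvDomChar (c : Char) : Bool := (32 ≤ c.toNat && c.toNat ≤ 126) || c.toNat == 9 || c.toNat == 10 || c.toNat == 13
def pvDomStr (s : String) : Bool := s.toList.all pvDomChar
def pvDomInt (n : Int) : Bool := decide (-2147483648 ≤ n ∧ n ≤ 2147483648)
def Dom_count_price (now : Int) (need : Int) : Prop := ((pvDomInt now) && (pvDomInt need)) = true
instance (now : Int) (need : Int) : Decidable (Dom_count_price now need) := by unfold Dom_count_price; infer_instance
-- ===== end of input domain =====

-- B replaces A's per-integer loop by closed-form arithmetic summation (objective: faster).

-- ===== PORT A =====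
def count_price (now : Int) (need : Int) : Int :=
  (PySem.List.pyRange (now + 1) (need + 1) 1).foldl (fun total_price i =>
    let tens := PySem.Int.floordiv i 10
    let numbers := PySem.Int.mod i 10
    let tens := if numbers = 0 then tens - 1 else tens
    if tens < 1 then total_price + 1 else total_price + (tens + 1)) 0

-- ===== PORT B =====
-- _T n: closed-form sum of j//10 over j in range(0, n) (used with n ≥ 10)
def pvT (n : Int) : Int :=
  let q := PySem.Int.floordiv n 10
  let r := n - 10 * q
  5 * q * (q - 1) + r * q

def count_price_alt (now : Int) (need : Int) : Int :=
  if need ≤ now then 0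
  else
    let small := max 0 (min need 10 - now)
    let l2 := max now 10
    let big := if l2 < need then (need - l2) + pvT need - pvT l2 else 0
    small + big

-- ===== PRECONDITION & SPEC =====
def Spec_count_price (now : Int) (need : Int) (out : Int) : Prop := out = count_price_alt now need
instance (now : Int) (need : Int) (out : Int) : Decidable (Spec_count_price now need out) := by unfold Spec_count_price; infer_instance

-- ===== CLAIM (what is proved, stated in full; the proofs are below) =====
def Claim_equal_count_price : Prop := ∀ (now : Int) (need : Int), Dom_count_price now need → Spec_count_price now need (count_price now need)

-- ===== LEMMAS AND PROOFS =====

-- A's per-element price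
def pvF (i : Int) : Int :=
  let tens := PySem.Int.floordiv i 10
  let tens := if PySem.Int.mod i 10 = 0 then tens - 1 else tens
  if tens < 1 then 1 else tens + 1

lemma Tdiff (n : Int) : pvT (n + 1) = pvT n + PySem.Int.floordiv n 10 := by
  simp only [pvT]
  rw [PySem.Int.floordiv_eq_ediv_of_pos (by norm_num),
      PySem.Int.floordiv_eq_ediv_of_pos (by norm_num)]
  rcases (by omega : n % 10 < 9 ∨ 9 ≤ n % 10) with hr | hr
  · have hq : (n + 1) / 10 = n / 10 := by omega
    rw [hq]; ring
  · have h9 : n = 10 * (n / 10) + 9 := by omega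
    have hq : (n + 1) / 10 = n / 10 + 1 := by omega
    rw [hq]
    generalize n / 10 = q at h9 ⊢
    rw [h9]; ring

lemma count_price_sum (now need : Int) :
    count_price now need = ((PySem.List.pyRange (now + 1) (need + 1) 1).map pvF).sum := by
  unfold count_price
  have hstep : (fun (total_price i : Int) =>
      let tens := PySem.Int.floordiv i 10
      let numbers := PySem.Int.mod i 10
      let tens := if numbers = 0 then tens - 1 else tens
      if tens < 1 then total_price + 1 else total_price + (tens + 1))
      = fun (total_price i : Int) => total_price + pvF i := by
    funext t i
    simp only [pvF]
    split <;> split <;> ring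
  rw [hstep, PySem.List.foldl_add]
  ring

lemma count_price_nil (now need : Int) (h : need ≤ now) : count_price now need = 0 := by
  unfold count_price
  rw [PySem.List.pyRange_one_eq_nil (by omega)]
  rfl

lemma count_price_step (now need : Int) (h : now < need) :
    count_price now need = pvF (now + 1) + count_price (now + 1) need := by
  rw [count_price_sum, count_price_sum, PySem.List.pyRange_one_cons (by omega)]
  simp [add_comm]

lemma alt_step (now need : Int) (h : now < need) :
    count_price_alt now need = pvF (now + 1) + count_price_alt (now + 1) need := by
  have hT := Tdiff now
  rw [PySem.Int.floordiv_eq_ediv_of_pos (by norm_num)] at hT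
  simp only [count_price_alt, pvF]
  rw [PySem.Int.floordiv_eq_ediv_of_pos (by norm_num),
      PySem.Int.mod_eq_emod_of_pos (by norm_num)]
  have hd1 : (now + 1) % 10 = 0 → (now + 1) / 10 - 1 = now / 10 := by omega
  have hd2 : (now + 1) % 10 ≠ 0 → (now + 1) / 10 = now / 10 := by omega
  rcases (by omega : now < 10 ∨ 10 ≤ now) with h10 | h10
  · have e1 : max now 10 = 10 := by omega
    have e2 : max (now + 1) 10 = 10 := by omega
    rw [e1, e2]
    have hdiv : now / 10 ≤ 0 := by omega
    split_ifs <;> omega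
  · have e1 : max now 10 = now := by omega
    have e2 : max (now + 1) 10 = now + 1 := by omega
    have hdiv : 1 ≤ now / 10 := by omega
    rcases (by omega : need = now + 1 ∨ now + 1 < need) with he | he
    · subst he
      rw [e1, e2, hT]
      split_ifs <;> omega
    · rw [e1, e2, hT]
      split_ifs <;> omega

lemma main_eq (now need : Int) : count_price now need = count_price_alt now need := by
  have key : ∀ k : Nat, ∀ m : Int, need - m ≤ (k : Int) →
      count_price m need = count_price_alt m need := by
    intro k
    induction k with
    | zero =>
      intro m hm
      have hle : need ≤ m := by omega
      rw [count_price_nil _ _ hle]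
      simp [count_price_alt, hle]
    | succ k ih =>
      intro m hm
      by_cases hlt : m < need
      · rw [count_price_step _ _ hlt, alt_step _ _ hlt, ih (m + 1) (by push_cast at hm ⊢; omega)]
      · have hle : need ≤ m := by omega
        rw [count_price_nil _ _ hle]
        simp [count_price_alt, hle]
  exact key (need - now).toNat now (by omega)

-- ===== VERDICT (by name: the statement is the Claim_ definition above) =====
theorem count_price_spec : Claim_equal_count_price := by
  intro now need _
  exact main_eq now need
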